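-- pv_equiv track=rewrite | github.com/hans/mt-project | code/translator/better/gramm_expand.py | expand_sent
-- ===== SOURCE A (Python) =====
-- def get_conjugated_ending(verb, tag):
--     tiempo = tag[3]
--     persona = tag[4]
--     numero = tag[5]
--
--     if (persona == '3' and numero == 's' and tiempo == 'p'
--         and verb != 'is' and verb[-2:] != 'es'):
--         if verb[-1] == 's':
--             return 'es'
--         else:
--             return 's'
--     return ''
--
-- def expand_verb(tag, en_list, use_pronoun):
--     """ Takes a verb with a POS tag and adds pronoun to the words in the
--     en_list """
--
--     if tag[0] == 'v':
--         tiempo = tag[3]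
--         persona = tag[4]
--         numero = tag[5]
--         # genero = tag[6]
--
--         pronoun = ''
--         if use_pronoun:
--             if persona == '1':
--                 pronoun = 'I ' if numero == 's' else 'we '
--             elif persona == '2':
--                 pronoun = 'you '
--             elif persona == '3':
--                 pronoun = '' if numero == 's' else 'they '
--
--         return [pronoun + en_word + get_conjugated_ending(en_word, tag)
--                 for en_word in en_list]
--     else:
--         return en_list
--
-- def expand_sent(tagged_tokens,en_lists):
--     """Takes the pos tags of a sentence, looks for verbs, and expands
--     them, deciding whether or not they need the pronoun"""
--
--     full_tags = [(tag or None) for _, tag in tagged_tokens]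
--     simp_tags = [((tag and tag[0]) or None) for _, tag in tagged_tokens]
--     for i, (t, tag) in enumerate(tagged_tokens):
--         if tag and tag.startswith('v') and (not tag[2] == 'p'):
--             use_pronoun = ('n' not in simp_tags[:i] and 'p' not in simp_tags[:i]
--                            and not any('this' in en_list for en_list in en_lists[:i + 2]))
--             en_lists[i] = expand_verb(tagged_tokens[i][1], en_lists[i],
--                                       use_pronoun)
--         # elif simp_tag == 's':
--         #     en_lists[i].append('')
--     return en_lists
-- ===== SOURCE B (Python) =====
-- # B: one pass with running flags (seen 'n'/'p' tag, 'this' seen in processed prefix)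
-- # instead of A's per-verb rescans of the whole prefix. Mutates en_lists in place like A.
--
-- def _pron(persona, numero):
--     if persona == '1':
--         return 'I ' if numero == 's' else 'we '
--     if persona == '2':
--         return 'you '
--     if persona == '3':
--         return '' if numero == 's' else 'they '
--     return ''
--
-- def _render(w, tag, use_pronoun):
--     pron = _pron(tag[4], tag[5]) if use_pronoun else ''
--     if tag[3] == 'p' and tag[4] == '3' and tag[5] == 's' and w != 'is' and not w.endswith('es'):
--         return pron + w + ('es' if w.endswith('s') else 's')
--     return pron + w
--
-- def expand_sent(tagged_tokens, en_lists):
--     out = list(en_lists)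
--     blocked = False      # an 'n'- or 'p'-tagged token occurred earlier
--     this_seen = False    # 'this' occurs in some already-processed list
--     for i, (_, tag) in enumerate(tagged_tokens):
--         if tag and tag[0] == 'v' and tag[2] != 'p':
--             use_pronoun = (not blocked and not this_seen
--                            and not any('this' in l for l in out[i:i + 2]))
--             out[i] = [_render(w, tag, use_pronoun) for w in out[i]]
--         if tag and tag[0] in 'np':
--             blocked = True
--         if i < len(out) and 'this' in out[i]:
--             this_seen = True
--     en_lists[:] = out
--     return en_lists
-- ===== Notes on version B (the rewrite author's own statement) =====
-- stated objective: alternative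
-- what changed: A rescans the whole prefix for every verb token (simp_tags[:i] membership tests and any('this' in ...) over en_lists[:i+2]); B makes a single pass that maintains two running flags (an 'n'/'p' tag seen so far, 'this' seen in an already-processed list) plus a two-element lookahead, trading A's per-verb prefix scans (quadratic in the worst case) for constant per-token flag updates; on typical inputs with few verbs the measured cost is the same.
import Mathlib
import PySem

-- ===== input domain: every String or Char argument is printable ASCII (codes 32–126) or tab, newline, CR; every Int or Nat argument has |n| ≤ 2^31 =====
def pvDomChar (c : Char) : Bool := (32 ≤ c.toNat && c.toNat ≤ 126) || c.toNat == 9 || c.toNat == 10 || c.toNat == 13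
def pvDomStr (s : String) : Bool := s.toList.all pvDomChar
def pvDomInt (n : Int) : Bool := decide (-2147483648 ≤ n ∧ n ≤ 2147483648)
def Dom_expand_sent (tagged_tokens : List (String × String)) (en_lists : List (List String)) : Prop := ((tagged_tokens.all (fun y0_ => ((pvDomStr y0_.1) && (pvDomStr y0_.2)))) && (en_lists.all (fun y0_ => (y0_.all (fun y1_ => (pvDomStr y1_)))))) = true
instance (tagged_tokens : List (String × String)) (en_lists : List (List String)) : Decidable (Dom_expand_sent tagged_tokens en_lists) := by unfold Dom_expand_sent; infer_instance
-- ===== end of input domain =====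

-- B replaces A's per-verb rescans of the whole prefix by running flags maintained in one pass.
-- A mutates en_lists in place (B's Python mirrors that via en_lists[:] = out); the equivalence
-- proved here is about the RETURN value.

-- ===== PORT A =====
-- get_conjugated_ending: none = IndexError (tag too short, or verb == '' reaching verb[-1])
def pyGetConjEnd (verb tag : String) : Option String :=
  match PySem.Str.pyGet? tag 3, PySem.Str.pyGet? tag 4, PySem.Str.pyGet? tag 5 with
  | some tiempo, some persona, some numero =>
    if persona = '3' ∧ numero = 's' ∧ tiempo = 'p' ∧ verb ≠ "is" ∧
        PySem.Str.slice verb (some (-2)) none ≠ "es" then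
      match PySem.Str.pyGet? verb (-1) with
      | some c => some (if c = 's' then "es" else "s")
      | none => none
    else some ""
  | _, _, _ => none

-- expand_verb
def pyExpandVerb (tag : String) (en_list : List String) (use_pronoun : Bool) : Option (List String) :=
  match PySem.Str.pyGet? tag 0 with
  | none => none
  | some c0 =>
    if c0 = 'v' then
      match PySem.Str.pyGet? tag 3, PySem.Str.pyGet? tag 4, PySem.Str.pyGet? tag 5 with
      | some _tiempo, some persona, some numero =>
        let pronoun : String :=
          if use_pronoun then
            if persona = '1' then (if numero = 's' then "I " else "we ")
            else if persona = '2' then "you "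
            else if persona = '3' then (if numero = 's' then "" else "they ")
            else ""
          else ""
        en_list.mapM (fun w => (pyGetConjEnd w tag).map (fun e => pronoun ++ w ++ e))
      | _, _, _ => none
    else some en_list

-- the for-loop of expand_sent; i is the enumerate index, acc the (mutated) en_lists
def expandLoopA (simp_tags : List (Option Char)) : Nat → List (String × String) → List (List String) → List (List String)
  | _, [], acc => acc
  | i, (_, tag) :: rest, acc =>
    let acc' :=
      if (tag ≠ "") ∧ PySem.Str.startswith tag "v" = true then
        match PySem.Str.pyGet? tag 2 with
        | none => acc   -- tag[2]: IndexError, outside Pre_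
        | some c2 =>
          if c2 = 'p' then acc
          else
            let use_pronoun : Bool :=
              !((simp_tags.take i).contains (some 'n')) &&
              !((simp_tags.take i).contains (some 'p')) &&
              !((PySem.List.slice acc none (some ((i : Int) + 2))).any (fun l => l.contains "this"))
            match PySem.List.pyGet? acc (i : Int) with
            | none => acc   -- en_lists[i]: IndexError, outside Pre_
            | some cur =>
              match pyExpandVerb tag cur use_pronoun with
              | none => acc   -- exception inside expand_verb, outside Pre_
              | some newl => acc.set i newl
      else acc
    expandLoopA simp_tags (i + 1) rest acc'

def expand_sent (tagged_tokens : List (String × String)) (en_lists : List (List String)) : List (List String) :=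
  let _full_tags : List (Option String) := tagged_tokens.map (fun p => if p.2 = "" then none else some p.2)
  let simp_tags : List (Option Char) := tagged_tokens.map (fun p => if p.2 = "" then none else PySem.Str.pyGet? p.2 0)
  expandLoopA simp_tags 0 tagged_tokens en_lists

-- ===== PORT B =====
def pronB (persona numero : Char) : String :=
  if persona = '1' then (if numero = 's' then "I " else "we ")
  else if persona = '2' then "you "
  else if persona = '3' then (if numero = 's' then "" else "they ")
  else ""

-- _render; none = IndexError on tag[3]/tag[4]/tag[5]
def renderB (w tag : String) (use_pronoun : Bool) : Option String :=
  match PySem.Str.pyGet? tag 3, PySem.Str.pyGet? tag 4, PySem.Str.pyGet? tag 5 with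
  | some t3, some t4, some t5 =>
    let pron := if use_pronoun then pronB t4 t5 else ""
    if t3 = 'p' ∧ t4 = '3' ∧ t5 = 's' ∧ w ≠ "is" ∧ ¬ PySem.Str.endswith w "es" = true then
      some (pron ++ w ++ (if PySem.Str.endswith w "s" then "es" else "s"))
    else some (pron ++ w)
  | _, _, _ => none

-- the single pass: out, blocked ('n'/'p' tag seen), this_seen ('this' in processed prefix)
def expandLoopB : Nat → List (String × String) → List (List String) → Bool → Bool → List (List String)
  | _, [], out, _, _ => out
  | i, (_, tag) :: rest, out, blocked, thisSeen =>
    let out' :=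
      if (tag ≠ "") ∧ PySem.Str.pyGet? tag 0 = some 'v' then
        match PySem.Str.pyGet? tag 2 with
        | none => out   -- tag[2]: IndexError, outside Pre_
        | some c2 =>
          if c2 = 'p' then out
          else
            let use_pronoun : Bool := !blocked && !thisSeen &&
              !((PySem.List.slice out (some (i : Int)) (some ((i : Int) + 2))).any (fun l => l.contains "this"))
            match PySem.List.pyGet? out (i : Int) with
            | none => out   -- out[i]: IndexError, outside Pre_
            | some cur =>
              match cur.mapM (fun w => renderB w tag use_pronoun) with
              | none => out   -- exception inside _render, outside Pre_
              | some newl => out.set i newl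
      else out
    let blocked' := blocked ||
      ((tag ≠ "" : Bool) && ((PySem.Str.pyGet? tag 0 == some 'n') || (PySem.Str.pyGet? tag 0 == some 'p')))
    let thisSeen' := thisSeen ||
      (match PySem.List.pyGet? out' (i : Int) with
       | some l => l.contains "this"
       | none => false)
    expandLoopB (i + 1) rest out' blocked' thisSeen'

def expand_sent_alt (tagged_tokens : List (String × String)) (en_lists : List (List String)) : List (List String) :=
  expandLoopB 0 tagged_tokens en_lists false false

-- ===== PRECONDITION & SPEC =====
-- Pre_ excludes exactly the inputs on which A raises IndexError: a 'v…'-tag shorter than 3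
-- (tag[2]), a non-'p'-mood verb whose index has no en_list (en_lists[i]) or whose tag is shorter
-- than 6 (tag[3..5]), and a present/3rd/singular verb whose en_list contains '' (verb[-1]).
def PreTok (i : Nat) (tag : String) (el : List (List String)) : Prop :=
  tag.toList.head? = some 'v' →
    3 ≤ tag.toList.length ∧
    (tag.toList[2]? ≠ some 'p' →
      i < el.length ∧ 6 ≤ tag.toList.length ∧
      ((tag.toList[3]? = some 'p' ∧ tag.toList[4]? = some '3' ∧ tag.toList[5]? = some 's') →
        ¬ ("" ∈ el.getD i [])))

def Pre_expand_sent (tagged_tokens : List (String × String)) (en_lists : List (List String)) : Prop :=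
  ∀ i, i < tagged_tokens.length → PreTok i (tagged_tokens.getD i ("", "")).2 en_lists

instance (tagged_tokens : List (String × String)) (en_lists : List (List String)) : Decidable (Pre_expand_sent tagged_tokens en_lists) := by
  unfold Pre_expand_sent
  haveI : ∀ i tag, Decidable (PreTok i tag en_lists) := fun i tag => by
    unfold PreTok; infer_instance
  infer_instance

def pvWitness_expand_sent : (List (String × String)) × List (List String) :=
  ([("goes", "vmip3s"), ("dog", "ncms")], [["go", "walk"], ["dog"]])

def Spec_expand_sent (tagged_tokens : List (String × String)) (en_lists : List (List String)) (out : List (List String)) : Prop := out = expand_sent_alt tagged_tokens en_lists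
instance (tagged_tokens : List (String × String)) (en_lists : List (List String)) (out : List (List String)) : Decidable (Spec_expand_sent tagged_tokens en_lists out) := by unfold Spec_expand_sent; infer_instance

-- ===== CLAIM (what is proved, stated in full; the proofs are below) =====
def Claim_equal_expand_sent : Prop := ∀ (tagged_tokens : List (String × String)) (en_lists : List (List String)), Dom_expand_sent tagged_tokens en_lists → Pre_expand_sent tagged_tokens en_lists → Spec_expand_sent tagged_tokens en_lists (expand_sent tagged_tokens en_lists)

-- ===== LEMMAS AND PROOFS =====
theorem strEq_iff (s t : String) : s = t ↔ s.toList = t.toList :=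
  ⟨fun h => h ▸ rfl, fun h => by have := congrArg String.ofList h; simpa using this⟩

theorem drop_eq_iff_suffix (xs ys : List Char) (h : ys.length = 2) :
    (xs.drop (xs.length - 2) = ys) ↔ ys <:+ xs := by
  rw [List.suffix_iff_eq_drop, ← h, eq_comm]

theorem slice_es (w : String) :
    (PySem.Str.slice w (some (-2)) none = "es") ↔ PySem.Str.endswith w "es" = true := by
  rw [strEq_iff]
  have hl : (PySem.Str.slice w (some (-2)) none).toList = w.toList.drop (w.toList.length - 2) := by
    simp [PySem.List.slice_from_neg_ofNat w.toList 2 (by omega), pysem]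
  rw [hl, show PySem.Str.endswith w "es" = PySem.Chars.endswith w.toList "es".toList from by simp,
      PySem.Chars.endswith_iff]
  exact drop_eq_iff_suffix _ _ rfl

theorem last_s (w : String) :
    (w.toList.getLast? = some 's') ↔ PySem.Str.endswith w "s" = true := by
  rw [show PySem.Str.endswith w "s" = PySem.Chars.endswith w.toList "s".toList from by simp,
      PySem.Chars.endswith_iff, List.getLast?_eq_some_iff]
  constructor
  · rintro ⟨l, h⟩; exact ⟨l, h.symm⟩
  · rintro ⟨l, h⟩; exact ⟨l, h.symm⟩

theorem word_one (w tag : String) (up : Bool) (t3 t4 t5 : Char)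
    (g3 : PySem.Str.pyGet? tag 3 = some t3) (g4 : PySem.Str.pyGet? tag 4 = some t4)
    (g5 : PySem.Str.pyGet? tag 5 = some t5)
    (hw : t3 = 'p' ∧ t4 = '3' ∧ t5 = 's' → w ≠ "") :
    (pyGetConjEnd w tag).map (fun e => (if up then pronB t4 t5 else "") ++ w ++ e)
      = renderB w tag up ∧ (renderB w tag up).isSome = true := by
  have bes : PySem.Str.endswith w "es" = PySem.Chars.endswith w.toList ['e', 's'] := by simp
  have bs : PySem.Str.endswith w "s" = PySem.Chars.endswith w.toList ['s'] := by simp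
  simp only [pyGetConjEnd, renderB, g3, g4, g5]
  by_cases hp : t3 = 'p' ∧ t4 = '3' ∧ t5 = 's'
  · obtain ⟨h3, h4, h5⟩ := hp
    subst h3; subst h4; subst h5
    have hw' : w ≠ "" := hw ⟨rfl, rfl, rfl⟩
    by_cases his : w = "is"
    · simp [his]
    · by_cases hes : PySem.Chars.endswith w.toList ['e', 's'] = true
      · have hsl : ¬ (PySem.Str.slice w (some (-2)) none ≠ "es") := by
          simp [(slice_es w).mpr (bes ▸ hes)]
        simp [his, hes, hsl]
      · have hes' : PySem.Chars.endswith w.toList ['e', 's'] = false := by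
          simpa using hes
        have hsl : PySem.Str.slice w (some (-2)) none ≠ "es" := fun h => hes (by
          have := (slice_es w).mp h; rw [bes] at this; exact this)
        have hnil : w.toList ≠ [] := by
          intro h; exact hw' (by rw [strEq_iff]; simpa using h)
        obtain ⟨c, hc⟩ : ∃ c, w.toList.getLast? = some c := by
          cases h : w.toList.getLast? with
          | none => exact absurd (List.getLast?_eq_none_iff.mp h) hnil
          | some c => exact ⟨c, rfl⟩
        rw [show PySem.Str.pyGet? w (-1) = w.toList.getLast? from by
          simp [PySem.List.pyGet?_neg_one]]
        by_cases hcs : c = 's'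
        · have hs1 : PySem.Chars.endswith w.toList ['s'] = true := by
            rw [← bs]; exact (last_s w).mp (hcs ▸ hc)
          simp [his, hes', hsl, hc, hcs, hs1]
        · have hs1 : PySem.Chars.endswith w.toList ['s'] = false := by
            rw [← bs]
            cases h : PySem.Str.endswith w "s" with
            | true => exact absurd (Option.some_inj.mp ((hc ▸ (last_s w).mpr h))) hcs
            | false => rfl
          simp [his, hes', hsl, hc, hcs, hs1]
  · have hA : ¬ (t4 = '3' ∧ t5 = 's' ∧ t3 = 'p' ∧ w ≠ "is" ∧
        PySem.Str.slice w (some (-2)) none ≠ "es") := by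
      intro ⟨a, b, c, _⟩; exact hp ⟨c, a, b⟩
    have hB : ¬ (t3 = 'p' ∧ t4 = '3' ∧ t5 = 's' ∧ w ≠ "is" ∧
        ¬ PySem.Str.endswith w "es" = true) := by
      intro ⟨a, b, c, _⟩; exact hp ⟨a, b, c⟩
    have hB' : ¬ (t3 = 'p' ∧ t4 = '3' ∧ t5 = 's' ∧ ¬ w = "is" ∧
        PySem.Chars.endswith w.toList ['e', 's'] = false) := by
      intro ⟨a, b, c, _⟩; exact hp ⟨a, b, c⟩
    simp [hA, hB']

theorem mapM_words (tag : String) (up : Bool) (t3 t4 t5 : Char)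
    (g3 : PySem.Str.pyGet? tag 3 = some t3) (g4 : PySem.Str.pyGet? tag 4 = some t4)
    (g5 : PySem.Str.pyGet? tag 5 = some t5) :
    ∀ (l : List String), ((t3 = 'p' ∧ t4 = '3' ∧ t5 = 's') → "" ∉ l) →
      l.mapM (fun w => (pyGetConjEnd w tag).map
          (fun e => (if up then pronB t4 t5 else "") ++ w ++ e))
        = l.mapM (fun w => renderB w tag up) ∧
      (l.mapM (fun w => renderB w tag up)).isSome = true := by
  intro l
  induction l with
  | nil => intro _; simp
  | cons w ws ih =>
    intro hz
    have hzw : (t3 = 'p' ∧ t4 = '3' ∧ t5 = 's') → w ≠ "" := by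
      intro hp he; exact hz hp (he ▸ List.mem_cons_self)
    obtain ⟨hone, hsome⟩ := word_one w tag up t3 t4 t5 g3 g4 g5 hzw
    obtain ⟨ihe, ihs⟩ := ih (fun hp he => hz hp (List.mem_cons_of_mem _ he))
    obtain ⟨r, hr⟩ := Option.isSome_iff_exists.mp hsome
    obtain ⟨rs, hrs⟩ := Option.isSome_iff_exists.mp ihs
    refine ⟨?_, ?_⟩
    · simp only [List.mapM_cons, hone, ihe, hr, hrs]
    · simp only [List.mapM_cons, hr, hrs]; rfl

theorem verb_eq (tag : String) (cur : List String) (up : Bool)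
    (h0 : tag.toList.head? = some 'v') (h6 : 6 ≤ tag.toList.length)
    (hz : (tag.toList[3]? = some 'p' ∧ tag.toList[4]? = some '3' ∧ tag.toList[5]? = some 's') →
      "" ∉ cur) :
    pyExpandVerb tag cur up = cur.mapM (fun w => renderB w tag up) ∧
      (cur.mapM (fun w => renderB w tag up)).isSome = true := by
  have g0 : PySem.Str.pyGet? tag 0 = some 'v' := by
    have h := PySem.Str.pyGet?_natCast tag 0
    simp only [Nat.cast_zero] at h
    rw [h, ← List.head?_eq_getElem?]; exact h0
  have e3 : tag.toList[3]? = some (tag.toList[3]'(by omega)) := List.getElem?_eq_getElem _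
  have e4 : tag.toList[4]? = some (tag.toList[4]'(by omega)) := List.getElem?_eq_getElem _
  have e5 : tag.toList[5]? = some (tag.toList[5]'(by omega)) := List.getElem?_eq_getElem _
  set t3 := tag.toList[3]'(by omega) with ht3
  set t4 := tag.toList[4]'(by omega) with ht4
  set t5 := tag.toList[5]'(by omega) with ht5
  have g3 : PySem.Str.pyGet? tag 3 = some t3 := by
    have h := PySem.Str.pyGet?_natCast tag 3; simp only [Nat.cast_ofNat] at h; rw [h, e3]
  have g4 : PySem.Str.pyGet? tag 4 = some t4 := by
    have h := PySem.Str.pyGet?_natCast tag 4; simp only [Nat.cast_ofNat] at h; rw [h, e4]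
  have g5 : PySem.Str.pyGet? tag 5 = some t5 := by
    have h := PySem.Str.pyGet?_natCast tag 5; simp only [Nat.cast_ofNat] at h; rw [h, e5]
  have hz' : (t3 = 'p' ∧ t4 = '3' ∧ t5 = 's') → "" ∉ cur := by
    intro ⟨a, b, c⟩; exact hz ⟨by rw [e3, a], by rw [e4, b], by rw [e5, c]⟩
  have main := mapM_words tag up t3 t4 t5 g3 g4 g5 cur hz'
  simp only [pyExpandVerb, g0, g3, g4, g5]
  exact main

theorem strGet0 (tag : String) : PySem.Str.pyGet? tag 0 = tag.toList.head? := by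
  have h := PySem.Str.pyGet?_natCast tag 0
  simp only [Nat.cast_zero] at h
  rw [h, ← List.head?_eq_getElem?]

theorem strGet2 (tag : String) : PySem.Str.pyGet? tag 2 = tag.toList[2]? := by
  have h := PySem.Str.pyGet?_natCast tag 2
  simp only [Nat.cast_ofNat] at h
  exact h

theorem startswith_v (tag : String) :
    (PySem.Str.startswith tag "v" = true) ↔ (tag.toList.head? = some 'v') := by
  rw [show PySem.Str.startswith tag "v" = PySem.Chars.startswith tag.toList "v".toList from by simp,
      PySem.Chars.startswith_iff]
  cases h : tag.toList with
  | nil => simp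
  | cons a l => simp [List.cons_prefix_iff]

theorem sliceA_take (xs : List (List String)) (i : Nat) :
    PySem.List.slice xs none (some ((i : Int) + 2)) = xs.take (i + 2) := by
  rw [show ((i : Int) + 2) = ((i + 2 : Nat) : Int) by push_cast; ring]
  exact PySem.List.slice_to_natCast xs (i + 2)

theorem sliceB_take (xs : List (List String)) (i : Nat) :
    PySem.List.slice xs (some (i : Int)) (some ((i : Int) + 2)) = (xs.drop i).take 2 := by
  rw [show ((i : Int) + 2) = ((i + 2 : Nat) : Int) by push_cast; ring]
  rw [PySem.List.slice_natCast]
  congr 1; omega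

theorem take_set_self (xs : List (List String)) (n : Nat) (v : List String) :
    (xs.set n v).take n = xs.take n := by
  rw [List.take_set, List.set_eq_of_length_le (by simp [])]

theorem any_take_succ (xs : List (List String)) (n : Nat) (p : List String → Bool) :
    (xs.take (n + 1)).any p = ((xs.take n).any p || (xs[n]?.elim false p)) := by
  rw [List.take_add_one, List.any_append]
  cases h : xs[n]? <;> simp

theorem blocked_step (simpPre : List (Option Char)) (tag : String) :
    ((simpPre ++ [if tag = "" then none else PySem.Str.pyGet? tag 0]).contains (some 'n')
      || (simpPre ++ [if tag = "" then none else PySem.Str.pyGet? tag 0]).contains (some 'p'))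
    = ((simpPre.contains (some 'n') || simpPre.contains (some 'p')) ||
       ((!(tag = "" : Bool)) && ((PySem.Str.pyGet? tag 0 == some 'n')
          || (PySem.Str.pyGet? tag 0 == some 'p')))) := by
  by_cases ht : tag = ""
  · simp [ht]
  · simp only [List.contains_append, ht]
    cases hn : simpPre.contains (some 'n') <;> cases hp : simpPre.contains (some 'p') <;>
      cases hg : PySem.List.pyGet? tag.toList 0 <;> simp [hg, eq_comm, Bool.beq_eq_decide_eq]

theorem preTok_set (j i : Nat) (tag : String) (el : List (List String)) (v : List String)
    (hne : j ≠ i) (h : PreTok j tag el) : PreTok j tag (el.set i v) := by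
  unfold PreTok at *
  intro hv; obtain ⟨a, b⟩ := h hv
  refine ⟨a, fun h2 => ?_⟩
  obtain ⟨c, d, e⟩ := b h2
  refine ⟨by simpa using c, d, fun h3 => ?_⟩
  have he := e h3
  rwa [List.getD_eq_getElem?_getD, List.getElem?_set_ne (by omega),
      ← List.getD_eq_getElem?_getD]

theorem loop_eq (rest : List (String × String)) :
    ∀ (simpPre : List (Option Char)) (acc : List (List String)),
    (∀ k, k < rest.length → PreTok (simpPre.length + k) ((rest.getD k ("", "")).2) acc) →
    expandLoopA (simpPre ++ rest.map (fun p => if p.2 = "" then none else PySem.Str.pyGet? p.2 0))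
        simpPre.length rest acc =
      expandLoopB simpPre.length rest acc
        ((simpPre.contains (some 'n')) || (simpPre.contains (some 'p')))
        ((acc.take simpPre.length).any (fun l => l.contains "this")) := by
  induction rest with
  | nil => intro simpPre acc _; simp [expandLoopA, expandLoopB]
  | cons hd rest ih =>
    intro simpPre acc H
    obtain ⟨t, tag⟩ := hd
    have hP0 := H 0 (by simp)
    simp only [List.getD_cons_zero, Nat.add_zero] at hP0
    have hget0 := strGet0 tag
    have hguard : ((tag ≠ "") ∧ PySem.Str.startswith tag "v" = true)
        ↔ ((tag ≠ "") ∧ PySem.Str.pyGet? tag 0 = some 'v') := by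
      rw [startswith_v, hget0]
    simp only [expandLoopA, expandLoopB, decide_not]
    -- the continuation: recursive calls agree for either possible new accumulator
    have hcont : ∀ acc' : List (List String),
        (acc' = acc ∨ ∃ v, acc' = acc.set simpPre.length v) →
        expandLoopA (simpPre ++ List.map (fun p => if p.2 = "" then none else PySem.Str.pyGet? p.2 0)
              ((t, tag) :: rest)) (simpPre.length + 1) rest acc' =
          expandLoopB (simpPre.length + 1) rest acc'
            (simpPre.contains (some 'n') || simpPre.contains (some 'p') ||
              ((!decide (tag = "")) &&
                (PySem.Str.pyGet? tag 0 == some 'n' || PySem.Str.pyGet? tag 0 == some 'p')))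
            ((List.take simpPre.length acc).any (fun l => l.contains "this") ||
              match PySem.List.pyGet? acc' (↑simpPre.length : Int) with
              | some l => l.contains "this"
              | none => false) := by
      intro acc' hset
      have H' : ∀ k, k < rest.length →
          PreTok ((simpPre ++ [if tag = "" then none else PySem.Str.pyGet? tag 0]).length + k)
            ((rest.getD k ("", "")).2) acc' := by
        intro k hk
        have h1 := H (k + 1) (by simpa using hk)
        simp only [List.getD_cons_succ] at h1
        have hidx : simpPre.length + (k + 1)
            = (simpPre ++ [if tag = "" then none else PySem.Str.pyGet? tag 0]).length + k := by
          simp; omega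
        rw [hidx] at h1
        rcases hset with rfl | ⟨v, rfl⟩
        · exact h1
        · exact preTok_set _ _ _ _ _ (by simp; omega) h1
      have hihres := ih (simpPre ++ [if tag = "" then none else PySem.Str.pyGet? tag 0]) acc' H'
      have hlen1 : (simpPre ++ [if tag = "" then none else PySem.Str.pyGet? tag 0]).length
          = simpPre.length + 1 := by simp
      rw [hlen1] at hihres
      rw [← List.append_cons] at hihres
      have htake' : (acc'.take simpPre.length) = acc.take simpPre.length := by
        rcases hset with rfl | ⟨v, rfl⟩
        · rfl
        · exact take_set_self acc simpPre.length v
      have hthis : ((acc'.take (simpPre.length + 1)).any (fun l => l.contains "this"))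
          = ((List.take simpPre.length acc).any (fun l => l.contains "this") ||
              match PySem.List.pyGet? acc' (↑simpPre.length : Int) with
              | some l => l.contains "this"
              | none => false) := by
        rw [any_take_succ, htake']
        congr 1
        rw [show PySem.List.pyGet? acc' (↑simpPre.length : Int) = acc'[simpPre.length]? from by simp]
        cases acc'[simpPre.length]? <;> rfl
      rw [blocked_step, hthis] at hihres
      simp only [List.map_cons]
      exact hihres
    by_cases hv : (tag ≠ "") ∧ PySem.Str.pyGet? tag 0 = some 'v'
    · rw [if_pos (hguard.mpr hv), if_pos hv]
      -- use_pronoun agreement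
      have hupr : ∀ b1 b2 b3 b4 : Bool, (!b1 && !b2 && !(b3 || b4)) = (!(b1 || b2) && !b3 && !b4) := by
        decide
      have htakeL : (List.take simpPre.length
          (simpPre ++ List.map (fun p => if p.2 = "" then none else PySem.Str.pyGet? p.2 0)
            ((t, tag) :: rest))) = simpPre := List.take_left
      have hupeq : (!(List.take simpPre.length
              (simpPre ++ List.map (fun p => if p.2 = "" then none else PySem.Str.pyGet? p.2 0)
                ((t, tag) :: rest))).contains (some 'n') &&
            !(List.take simpPre.length
              (simpPre ++ List.map (fun p => if p.2 = "" then none else PySem.Str.pyGet? p.2 0)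
                ((t, tag) :: rest))).contains (some 'p') &&
            !(PySem.List.slice acc none (some ((↑simpPre.length : Int) + 2))).any
                (fun l => l.contains "this"))
          = (!(simpPre.contains (some 'n') || simpPre.contains (some 'p')) &&
              !(List.take simpPre.length acc).any (fun l => l.contains "this") &&
            !(PySem.List.slice acc (some (↑simpPre.length : Int))
                (some ((↑simpPre.length : Int) + 2))).any (fun l => l.contains "this")) := by
        rw [htakeL, sliceA_take, sliceB_take, List.take_add, List.any_append]
        exact hupr _ _ _ _
      rw [hupeq]
      cases hg2 : PySem.Str.pyGet? tag 2 with
      | none => exact hcont acc (Or.inl rfl)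
      | some c2 =>
        dsimp only
        by_cases hc2 : c2 = 'p'
        · rw [if_pos hc2, if_pos hc2]
          exact hcont acc (Or.inl rfl)
        · rw [if_neg hc2, if_neg hc2]
          -- the verb branch: Pre_ gives everything we need
          have hv0' : tag.toList.head? = some 'v' := by rw [← hget0]; exact hv.2
          have hP := hP0 hv0'
          obtain ⟨h3len, hrest0⟩ := hP
          have h2ne : tag.toList[2]? ≠ some 'p' := by
            rw [← strGet2, hg2]; simpa using hc2
          obtain ⟨hilt, h6len, hz⟩ := hrest0 h2ne
          have hcur : PySem.List.pyGet? acc (↑simpPre.length : Int)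
              = some (acc[simpPre.length]'hilt) := by
            simp
          rw [hcur]
          dsimp only
          have hz' : (tag.toList[3]? = some 'p' ∧ tag.toList[4]? = some '3' ∧
              tag.toList[5]? = some 's') → "" ∉ (acc[simpPre.length]'hilt) := by
            intro hp
            have := hz hp
            rwa [List.getD_eq_getElem?_getD, List.getElem?_eq_getElem hilt] at this
          have hv0 : tag.toList.head? = some 'v' := by rw [← hget0]; exact hv.2
          obtain ⟨hverb, hsome⟩ := verb_eq tag (acc[simpPre.length]'hilt) _
            hv0 h6len hz'
          rw [hverb]
          obtain ⟨newl, hnl⟩ := Option.isSome_iff_exists.mp hsome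
          rw [hnl]
          exact hcont _ (Or.inr ⟨newl, rfl⟩)
    · rw [if_neg (fun h => hv (hguard.mp h)), if_neg hv]
      exact hcont acc (Or.inl rfl)

-- ===== VERDICT (by name: the statement is the Claim_ definition above) =====
theorem expand_sent_spec : Claim_equal_expand_sent := by
  unfold Claim_equal_expand_sent
  intro tagged_tokens en_lists _ hpre
  unfold Spec_expand_sent expand_sent expand_sent_alt
  have h := loop_eq tagged_tokens [] en_lists (by
    intro k hk
    simpa using hpre k hk)
  simpa using h
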